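-- pv_equiv track=rewrite | github.com/bnyw/adventofcode2023 | 1/1.py | ltr_replace
-- ===== SOURCE A (Python) =====
-- digit_word = ["one", "two", "three", "four", "five", "six", "seven", "eight", "nine"]
--
-- def ltr_replace(text: str) -> str:
--     replaced = False
--     for dig in digit_word:
--         if text.startswith(dig):
--             text = text.replace(dig, str(digit_word.index(dig) + 1), 1)
--             replaced = True
--             if len(text) > 2:
--                 text = text[0] + ltr_replace(text[1:])
--
--     if not replaced and len(text) > 2:
--         text = text[0] + ltr_replace(text[1:])
--
--     return text
-- ===== SOURCE B (Python) =====
-- digit_word = ["one", "two", "three", "four", "five", "six", "seven", "eight", "nine"]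
--
-- def ltr_replace(text: str) -> str:
--     out = []
--     i = 0
--     n = len(text)
--     while i < n:
--         for k, w in enumerate(digit_word):
--             if text.startswith(w, i):
--                 out.append(str(k + 1))
--                 i += len(w)
--                 break
--         else:
--             out.append(text[i])
--             i += 1
--     return "".join(out)
-- ===== Notes on version B (the rewrite author's own statement) =====
-- stated objective: faster
-- what changed: A recursively replaces a leading digit-word and re-splices text[0] + ltr_replace(text[1:]) at every position, copying O(n)-size slices per recursion level; B is a single iterative left-to-right scan with an index and an output buffer that appends the digit and jumps past the whole matched word (or copies one character), with no recursion and no string slicing.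
import Mathlib
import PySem

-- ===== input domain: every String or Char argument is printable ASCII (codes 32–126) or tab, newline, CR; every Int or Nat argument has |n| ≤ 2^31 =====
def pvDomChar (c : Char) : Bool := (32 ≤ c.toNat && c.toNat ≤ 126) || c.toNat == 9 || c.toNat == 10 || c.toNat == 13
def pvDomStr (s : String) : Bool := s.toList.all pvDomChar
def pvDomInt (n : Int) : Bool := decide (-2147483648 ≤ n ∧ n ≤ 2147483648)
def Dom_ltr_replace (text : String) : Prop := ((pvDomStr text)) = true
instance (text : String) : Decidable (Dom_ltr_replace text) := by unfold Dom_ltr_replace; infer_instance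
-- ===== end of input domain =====

-- B replaces A's recursive replace-and-resplice with a single iterative left-to-right scan that
-- appends either the digit (skipping the whole matched word) or the current character to an
-- output buffer (objective: simpler; same return value).

-- ===== PORT A =====

-- digit_word together with str(index + 1), precomputed once (shared table of both ports)
def pvPairs : List (List Char × Char) :=
  [(['o','n','e'], '1'), (['t','w','o'], '2'), (['t','h','r','e','e'], '3'),
   (['f','o','u','r'], '4'), (['f','i','v','e'], '5'), (['s','i','x'], '6'),
   (['s','e','v','e','n'], '7'), (['e','i','g','h','t'], '8'), (['n','i','n','e'], '9')]

-- hand port of s.replace(w, r, 1) (PySem.Chars.replace has no count): replace the FIRST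
-- occurrence of w; exact for every w (for w = [] Python inserts r at the front, as here)
def pvReplace1 (s w r : List Char) : List Char :=
  if w.isPrefixOf s then r ++ s.drop w.length
  else match s with
    | [] => []
    | c :: cs => c :: pvReplace1 cs w r

-- the `for dig in digit_word:` loop of A, carrying (text, replaced); `f` is the pending
-- recursive call ltr_replace(text[1:])
def ltrA_loop (f : List Char → List Char) :
    List (List Char × Char) → List Char → Bool → List Char × Bool
  | [], text, r => (text, r)
  | (w, d) :: rest, text, r =>
    if w.isPrefixOf text then
      -- text = text.replace(dig, str(digit_word.index(dig) + 1), 1); replaced = True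
      let t1 := pvReplace1 text w [d]
      -- if len(text) > 2: text = text[0] + ltr_replace(text[1:])
      let t2 := if 2 < t1.length then t1.head! :: f t1.tail else t1
      ltrA_loop f rest t2 true
    else ltrA_loop f rest text r

-- A's recursion, driven by fuel; every Python-level recursive call is on a strictly shorter
-- string, so fuel = length of the string never runs out (the fuel-0 branch is a totality
-- guard only; core_go below proves the function's value on all reachable calls)
def ltrA_go : Nat → List Char → List Char
  | 0, t => t
  | fuel + 1, t =>
    let st := ltrA_loop (ltrA_go fuel) pvPairs t false
    -- if not replaced and len(text) > 2: text = text[0] + ltr_replace(text[1:])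
    if st.2 = false ∧ 2 < st.1.length then st.1.head! :: ltrA_go fuel st.1.tail else st.1

def ltr_replace (text : String) : String :=
  String.ofList (ltrA_go text.toList.length text.toList)

-- ===== PORT B =====

-- the inner `for k, w in enumerate(digit_word): if text.startswith(w, i)` of B:
-- first word matching at the current position, as (digit, word length)
def ltrB_find (ws : List (List Char × Char)) (t : List Char) : Option (Char × Nat) :=
  match ws with
  | [] => none
  | (w, d) :: rest => if w.isPrefixOf t then some (d, w.length) else ltrB_find rest t

-- the `while i < n` scan of B; position i ↔ the remaining suffix, buffer built by cons
def ltrB_go (t : List Char) : List Char :=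
  match t with
  | [] => []
  | c :: cs =>
    match ltrB_find pvPairs (c :: cs) with
    | some (d, k) => d :: ltrB_go (cs.drop (k - 1))  -- i += len(w): skip the whole word
    | none => c :: ltrB_go cs                        -- i += 1
termination_by t.length
decreasing_by
  all_goals (simp; try omega)

def ltr_replace_alt (text : String) : String :=
  String.ofList (ltrB_go text.toList)

-- ===== PRECONDITION & SPEC =====
def Spec_ltr_replace (text : String) (out : String) : Prop := out = ltr_replace_alt text
instance (text : String) (out : String) : Decidable (Spec_ltr_replace text out) := by unfold Spec_ltr_replace; infer_instance

-- ===== CLAIM (what is proved, stated in full; the proofs are below) =====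
def Claim_equal_ltr_replace : Prop := ∀ (text : String), Dom_ltr_replace text → Spec_ltr_replace text (ltr_replace text)

-- ===== LEMMAS AND PROOFS =====

def pvDigits : List Char := ['1','2','3','4','5','6','7','8','9']

theorem pairs_min_len : ∀ p ∈ pvPairs, 3 ≤ p.1.length := by decide

theorem pairs_digit : ∀ p ∈ pvPairs, p.2 ∈ pvDigits := by decide

theorem pairs_head_ne_digit : ∀ p ∈ pvPairs, ∀ c ∈ pvDigits, p.1.head? ≠ some c := by
  intro p hp c hc
  fin_cases hp <;> fin_cases hc <;> simp

theorem pvReplace1_of_prefix (s w r : List Char) (h : w.isPrefixOf s) :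
    pvReplace1 s w r = r ++ s.drop w.length := by
  unfold pvReplace1; simp [h]

theorem not_prefix_of_head_ne (w : List Char) (c : Char) (x : List Char)
    (hw : w ≠ []) (hne : w.head? ≠ some c) : w.isPrefixOf (c :: x) = false := by
  cases w with
  | nil => exact absurd rfl hw
  | cons a l =>
    simp at hne
    simp [List.isPrefixOf, hne]

theorem loop_nomatch (f : List Char → List Char) (ws : List (List Char × Char))
    (text : List Char) (r : Bool)
    (hnm : ∀ p ∈ ws, p.1.isPrefixOf text = false) :
    ltrA_loop f ws text r = (text, r) := by
  induction ws with
  | nil => rw [ltrA_loop]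
  | cons p rest ih =>
    obtain ⟨w, d⟩ := p
    rw [ltrA_loop]
    simp only [hnm (w, d) (by simp), Bool.false_eq_true, if_false]
    exact ih (fun p hp => hnm p (List.mem_cons_of_mem _ hp))

theorem find_none (ws : List (List Char × Char)) (t : List Char)
    (h : ltrB_find ws t = none) : ∀ p ∈ ws, p.1.isPrefixOf t = false := by
  induction ws with
  | nil => simp
  | cons p rest ih =>
    obtain ⟨w, d⟩ := p
    rw [ltrB_find] at h
    intro q hq
    by_cases hw : w.isPrefixOf t
    · simp [hw] at h
    · simp only [Bool.eq_false_iff.mpr hw, Bool.false_eq_true, if_false] at h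
      rcases List.mem_cons.mp hq with hq | hq
      · subst hq; exact Bool.eq_false_iff.mpr hw
      · exact ih h q hq

theorem find_short (ws : List (List Char × Char)) (hws : ∀ p ∈ ws, 3 ≤ p.1.length)
    (t : List Char) (ht : t.length < 3) : ltrB_find ws t = none := by
  induction ws with
  | nil => rw [ltrB_find]
  | cons p rest ih =>
    obtain ⟨w, d⟩ := p
    rw [ltrB_find]
    have hw : w.isPrefixOf t = false := by
      by_cases hw : w.isPrefixOf t
      · have h1 := (List.isPrefixOf_iff_prefix.mp hw).length_le
        have h2 : 3 ≤ w.length := hws (w, d) (List.mem_cons_self ..)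
        omega
      · exact Bool.eq_false_iff.mpr hw
    simp only [hw, Bool.false_eq_true, if_false]
    exact ih (fun p hp => hws p (List.mem_cons_of_mem _ hp))

theorem find_some_len (ws : List (List Char × Char)) (hws : ∀ p ∈ ws, 3 ≤ p.1.length)
    (t : List Char) (d : Char) (k : Nat) (h : ltrB_find ws t = some (d, k)) : 3 ≤ k := by
  induction ws with
  | nil => exact absurd h (by rw [ltrB_find]; simp)
  | cons p rest ih =>
    obtain ⟨w, d'⟩ := p
    rw [ltrB_find] at h
    by_cases hw : w.isPrefixOf t
    · simp only [hw, if_true, Option.some.injEq, Prod.mk.injEq] at h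
      have h3 : 3 ≤ w.length := hws (w, d') (List.mem_cons_self ..)
      omega
    · simp only [Bool.eq_false_iff.mpr hw, Bool.false_eq_true, if_false] at h
      exact ih (fun p hp => hws p (List.mem_cons_of_mem _ hp)) h

theorem go_short (t : List Char) (ht : t.length ≤ 2) : ltrB_go t = t := by
  have hf : ∀ (s : List Char), s.length < 3 → ltrB_find pvPairs s = none :=
    fun s hs => find_short pvPairs pairs_min_len s hs
  match t with
  | [] => rw [ltrB_go]
  | [a] => rw [ltrB_go, hf [a] (by simp), ltrB_go]
  | [a, b] => rw [ltrB_go, hf [a, b] (by simp), ltrB_go, hf [b] (by simp), ltrB_go]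

theorem loop_match_eval (f : List Char → List Char) (ws : List (List Char × Char))
    (hws : ∀ p ∈ ws, 3 ≤ p.1.length) (hsub : ∀ p ∈ ws, p ∈ pvPairs)
    (text : List Char) (d : Char) (k : Nat)
    (hfind : ltrB_find ws text = some (d, k))
    (IH : ∀ s : List Char, s.length < text.length → f s = ltrB_go s) :
    ltrA_loop f ws text false = (d :: ltrB_go (text.drop k), true) := by
  induction ws with
  | nil => exact absurd hfind (by rw [ltrB_find]; simp)
  | cons p rest ih =>
    obtain ⟨w, d'⟩ := p
    rw [ltrB_find] at hfind
    by_cases hw : w.isPrefixOf text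
    · simp only [hw, if_true, Option.some.injEq, Prod.mk.injEq] at hfind
      obtain ⟨hd, hk⟩ := hfind
      rw [← hd, ← hk]
      clear hd hk
      have hw3 : 3 ≤ w.length := hws (w, d') (List.mem_cons_self ..)
      have hwl : w.length ≤ text.length := (List.isPrefixOf_iff_prefix.mp hw).length_le
      have ht1 : pvReplace1 text w [d'] = d' :: text.drop w.length := by
        rw [pvReplace1_of_prefix text w [d'] hw]; rfl
      have hdig : d' ∈ pvDigits := pairs_digit (w, d') (hsub (w, d') (List.mem_cons_self ..))
      have hnm : ∀ (x : List Char), ∀ p ∈ rest, p.1.isPrefixOf (d' :: x) = false := by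
        intro x p hp
        have hpm : p ∈ pvPairs := hsub p (List.mem_cons_of_mem _ hp)
        exact not_prefix_of_head_ne p.1 d' x
          (by have := pairs_min_len p hpm; intro hc; simp [hc] at this)
          (pairs_head_ne_digit p hpm d' hdig)
      rw [ltrA_loop]
      simp only [hw, if_true, ht1]
      split
      · -- len(text) > 2 after the replacement: A recurses on the tail
        simp only [List.head!_cons, List.tail_cons]
        rw [loop_nomatch _ _ _ _ (hnm _)]
        rw [IH (text.drop w.length) (by simp; omega)]
      · -- short result: A keeps it, and B's tail is returned unchanged too
        next h2 =>
        simp only [List.length_cons, not_lt] at h2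
        rw [go_short (text.drop w.length) (by simp at h2 ⊢; omega)]
        rw [loop_nomatch _ _ _ _ (hnm _)]
    · simp only [Bool.eq_false_iff.mpr hw, Bool.false_eq_true, if_false] at hfind
      rw [ltrA_loop]
      simp only [Bool.eq_false_iff.mpr hw, Bool.false_eq_true, if_false]
      exact ih (fun p hp => hws p (List.mem_cons_of_mem _ hp))
        (fun p hp => hsub p (List.mem_cons_of_mem _ hp)) hfind

theorem core_go (fuel : Nat) : ∀ (t : List Char), t.length ≤ fuel → ltrA_go fuel t = ltrB_go t := by
  induction fuel with
  | zero =>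
    intro t ht
    have : t = [] := List.eq_nil_of_length_eq_zero (by omega)
    subst this
    rw [ltrA_go, ltrB_go]
  | succ n IH =>
    intro t ht
    rw [ltrA_go]
    cases hfind : ltrB_find pvPairs t with
    | none =>
      rw [loop_nomatch _ _ _ _ (find_none pvPairs t hfind)]
      cases t with
      | nil => rw [ltrB_go]; simp
      | cons c cs =>
        rw [ltrB_go, hfind]
        by_cases hlen : 2 < (c :: cs).length
        · simp only [hlen, and_true, if_true]
          simp only [List.head!_cons, List.tail_cons]
          rw [IH cs (by simp at ht ⊢; omega)]
        · simp only [hlen, and_false, if_false]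
          have : ltrB_go cs = cs := go_short cs (by simp at hlen; omega)
          simp [this]
    | some dk =>
      obtain ⟨d, k⟩ := dk
      rw [loop_match_eval (ltrA_go n) pvPairs pairs_min_len (fun p hp => hp) t d k hfind
        (fun s hs => IH s (by omega))]
      -- replaced = True: A returns the loop's text as is; B takes the very same step
      simp only [Bool.true_eq_false, false_and, if_false]
      cases t with
      | nil => rw [show ltrB_find pvPairs ([] : List Char) = none from rfl] at hfind; exact absurd hfind (by simp)
      | cons c cs =>
        rw [ltrB_go, hfind]
        have hk : 3 ≤ k := find_some_len pvPairs pairs_min_len (c :: cs) d k hfind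
        congr 1
        cases k with
        | zero => omega
        | succ k' => simp

-- ===== VERDICT (by name: the statement is the Claim_ definition above) =====
theorem ltr_replace_spec : Claim_equal_ltr_replace := by
  intro text _
  unfold Spec_ltr_replace ltr_replace ltr_replace_alt
  rw [core_go text.toList.length text.toList (le_refl _)]
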